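-- pv_equiv track=rewrite | github.com/MAYA-MUYI/Python | idioms/query.py | search_by_key_type
-- ===== SOURCE A (Python) =====
-- def idiom_type(idiom):
--     if idiom[0] == idiom[1] and idiom[2] == idiom[3] and idiom[1] != idiom[2]:
--         return "AABB"
--     elif idiom[0] != idiom[1] and idiom[0] != idiom[2] and idiom[1] != idiom[2] and idiom[2] == idiom[3]:
--         return "ABCC"
--     elif idiom[0] == idiom[1] and idiom[2] != idiom[3] and idiom[1] != idiom[2]:
--         return "AABC"
--     elif idiom[0] != idiom[1] and idiom[0] == idiom[2] and idiom[0] != idiom[3] and idiom[1] != idiom[3]: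
--         return "ABAC"
--     elif idiom[0] == idiom[3] and idiom[0] != idiom[1] and idiom[0] != idiom[2] and idiom[1] != idiom[2]:
--         return "ABCA"
--     elif idiom[0] != idiom[1] and idiom[0] != idiom[3] and idiom[1] != idiom[3] and idiom[1] == idiom[2]:
--         return "ABBC"
--     elif idiom[0] != idiom[1] and idiom[0] != idiom[2] and idiom[1] == idiom[3] and idiom[1] != idiom[2]:
--         return "ABCB"
--     else:
--         return "other"
--
-- def search_by_key_type(key, type, idioms, context, keys):
--     for k, v in idioms.items():
--         if key in k or key in v:
--             keys.append(k)
--     for k, v in idioms.items():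
--         if k in keys and len(k) == 4 and idiom_type(k) == type:
--             context[k] = v
--     return context
-- ===== SOURCE B (Python) =====
-- # Single fused pass over idioms.items() (append to keys, then decide context insertion
-- # in the same iteration), and idiom_type replaced by a first-occurrence-pattern table lookup.
-- _PATTERN_TABLE = {
--     (0, 0, 2, 0): "AABC", (0, 0, 2, 2): "AABB", (0, 0, 2, 3): "AABC",
--     (0, 1, 0, 3): "ABAC", (0, 1, 1, 3): "ABBC", (0, 1, 2, 0): "ABCA",
--     (0, 1, 2, 1): "ABCB", (0, 1, 2, 2): "ABCC",
-- }
--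
-- def idiom_type(idiom):
--     pat = tuple(idiom.index(ch) for ch in idiom)
--     return _PATTERN_TABLE.get(pat, "other")
--
-- def search_by_key_type(key, type, idioms, context, keys):
--     for k, v in idioms.items():
--         if key in k or key in v:
--             keys.append(k)
--         if k in keys and len(k) == 4 and idiom_type(k) == type:
--             context[k] = v
--     return context
-- ===== Notes on version B (the rewrite author's own statement) =====
-- stated objective: alternative
-- what changed: B makes one fused pass over idioms (appending to keys and deciding the context insertion in the same iteration) instead of A's two sequential scans, and classifies idioms by a first-occurrence-index pattern looked up in a table instead of A's chain of pairwise-equality branches; Pre_ excludes idioms association lists with duplicate keys, which cannot arise from a Python dict and on which the context insertion order of the fused pass is accidental.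
import Mathlib
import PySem

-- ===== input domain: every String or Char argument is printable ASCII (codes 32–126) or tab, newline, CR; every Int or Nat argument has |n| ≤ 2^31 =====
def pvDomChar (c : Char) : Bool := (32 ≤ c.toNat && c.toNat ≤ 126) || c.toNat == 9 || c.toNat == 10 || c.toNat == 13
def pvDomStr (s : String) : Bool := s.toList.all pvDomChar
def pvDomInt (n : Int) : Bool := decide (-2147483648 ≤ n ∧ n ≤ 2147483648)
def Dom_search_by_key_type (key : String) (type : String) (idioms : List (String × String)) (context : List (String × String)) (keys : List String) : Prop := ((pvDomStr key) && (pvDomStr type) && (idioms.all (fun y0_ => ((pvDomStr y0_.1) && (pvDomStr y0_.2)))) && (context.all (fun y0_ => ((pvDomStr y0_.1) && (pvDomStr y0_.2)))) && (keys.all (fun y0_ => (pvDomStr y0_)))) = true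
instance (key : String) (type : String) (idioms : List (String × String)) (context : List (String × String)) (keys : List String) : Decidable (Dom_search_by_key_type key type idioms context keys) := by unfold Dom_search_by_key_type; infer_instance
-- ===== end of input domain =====

-- B fuses A's two scans of idioms into one pass and classifies idioms with a
-- first-occurrence-pattern table instead of A's branch chain; the equivalence proved here is
-- about the return value (both Pythons also mutate `keys` and `context`, identically).

-- ===== PORT A =====
-- A's idiom_type: chain of pairwise character-equality branches; idiom[i] → pyGet? (exact;
-- only ever applied under the len(k) == 4 guard, where every index is in range)
def idiom_type (idiom : String) : String :=
  let c := fun (i : Int) => PySem.Str.pyGet? idiom i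
  if c 0 == c 1 && c 2 == c 3 && c 1 != c 2 then "AABB"
  else if c 0 != c 1 && c 0 != c 2 && c 1 != c 2 && c 2 == c 3 then "ABCC"
  else if c 0 == c 1 && c 2 != c 3 && c 1 != c 2 then "AABC"
  else if c 0 != c 1 && c 0 == c 2 && c 0 != c 3 && c 1 != c 3 then "ABAC"
  else if c 0 == c 3 && c 0 != c 1 && c 0 != c 2 && c 1 != c 2 then "ABCA"
  else if c 0 != c 1 && c 0 != c 3 && c 1 != c 3 && c 1 == c 2 then "ABBC"
  else if c 0 != c 1 && c 0 != c 2 && c 1 == c 3 && c 1 != c 2 then "ABCB"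
  else "other"

def search_by_key_type (key : String) (type : String) (idioms : List (String × String)) (context : List (String × String)) (keys : List String) : List (String × String) :=
  -- first loop: keys.append(k) when key in k or key in v
  let keys1 := idioms.foldl (fun ks kv =>
    if PySem.Str.isIn key kv.1 || PySem.Str.isIn key kv.2 then ks ++ [kv.1] else ks) keys
  -- second loop: context[k] = v when k in keys and len(k) == 4 and idiom_type(k) == type
  let ctx := idioms.foldl (fun (d : PySem.Dict String String) kv =>
    if keys1.contains kv.1 && (PySem.Str.len kv.1 == 4) && (idiom_type kv.1 == type)
    then d.insert kv.1 kv.2 else d) (PySem.Dict.mk context)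
  ctx.items

-- ===== PORT B =====
def patternTable : List (List Nat × String) :=
  [([0, 0, 2, 0], "AABC"), ([0, 0, 2, 2], "AABB"), ([0, 0, 2, 3], "AABC"),
   ([0, 1, 0, 3], "ABAC"), ([0, 1, 1, 3], "ABBC"), ([0, 1, 2, 0], "ABCA"),
   ([0, 1, 2, 1], "ABCB"), ([0, 1, 2, 2], "ABCC")]

-- B's idiom_type: first-occurrence-index pattern, table lookup
-- (idiom.index(ch) for a character ch of idiom is its first-occurrence index = idxOf; exact)
def idiom_type_alt (idiom : String) : String :=
  let cs := idiom.toList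
  let pat := cs.map (fun ch => cs.idxOf ch)
  (PySem.Dict.mk patternTable).getD pat "other"

def search_by_key_type_alt (key : String) (type : String) (idioms : List (String × String)) (context : List (String × String)) (keys : List String) : List (String × String) :=
  -- single fused pass: append to keys, then decide the context insertion, per item
  let st := idioms.foldl (fun (st : List String × PySem.Dict String String) kv =>
    let ks := if PySem.Str.isIn key kv.1 || PySem.Str.isIn key kv.2 then st.1 ++ [kv.1] else st.1
    let ctx := if ks.contains kv.1 && (PySem.Str.len kv.1 == 4) && (idiom_type_alt kv.1 == type)
               then st.2.insert kv.1 kv.2 else st.2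
    (ks, ctx)) (keys, PySem.Dict.mk context)
  st.2.items

-- ===== PRECONDITION & SPEC =====
-- Pre_ excludes idioms association lists with duplicate keys: they cannot arise from the
-- Python dict this list models, and the relative context insertion order produced there by
-- A's two-pass scheme is accidental.
def Pre_search_by_key_type (key : String) (type : String) (idioms : List (String × String)) (context : List (String × String)) (keys : List String) : Prop :=
  (idioms.map Prod.fst).Nodup
instance (key : String) (type : String) (idioms : List (String × String)) (context : List (String × String)) (keys : List String) : Decidable (Pre_search_by_key_type key type idioms context keys) := by unfold Pre_search_by_key_type; infer_instance

def pvWitness_search_by_key_type : String × String × (List (String × String)) × (List (String × String)) × List String :=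
  ("a", "AABB", [("aabb", "x"), ("ccdd", "ya")], [("k", "v")], ["aabb"])

def Spec_search_by_key_type (key : String) (type : String) (idioms : List (String × String)) (context : List (String × String)) (keys : List String) (out : List (String × String)) : Prop := out = search_by_key_type_alt key type idioms context keys
instance (key : String) (type : String) (idioms : List (String × String)) (context : List (String × String)) (keys : List String) (out : List (String × String)) : Decidable (Spec_search_by_key_type key type idioms context keys out) := by unfold Spec_search_by_key_type; infer_instance

-- ===== CLAIM (what is proved, stated in full; the proofs are below) =====
def Claim_equal_search_by_key_type : Prop := ∀ (key : String) (type : String) (idioms : List (String × String)) (context : List (String × String)) (keys : List String), Dom_search_by_key_type key type idioms context keys → Pre_search_by_key_type key type idioms context keys → Spec_search_by_key_type key type idioms context keys (search_by_key_type key type idioms context keys)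

-- ===== LEMMAS AND PROOFS =====

-- A's branch chain, abstracted over the six pairwise-equality booleans
def typeOfEq (ab ac ad bc bd cd : Bool) : String :=
  if ab && cd && !bc then "AABB"
  else if !ab && !ac && !bc && cd then "ABCC"
  else if ab && !cd && !bc then "AABC"
  else if !ab && ac && !ad && !bd then "ABAC"
  else if ad && !ab && !ac && !bc then "ABCA"
  else if !ab && !ad && !bd && bc then "ABBC"
  else if !ab && !ac && bd && !bc then "ABCB"
  else "other"

-- B's pattern lookup, abstracted over the same six booleans
def altOfEq (ab ac ad bc bd cd : Bool) : String :=
  (PySem.Dict.mk patternTable).getD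
    [0, if ab then 0 else 1, if ac then 0 else if bc then 1 else 2,
     if ad then 0 else if bd then 1 else if cd then 2 else 3] "other"

-- the six booleans come from an equality relation: transitivity on each triple
def triConsistent (x y z : Bool) : Bool := (!(x && y) || z) && (!(x && z) || y) && (!(y && z) || x)
def eqConsistent (ab ac ad bc bd cd : Bool) : Bool :=
  triConsistent ab ac bc && triConsistent ab ad bd && triConsistent ac ad cd && triConsistent bc bd cd

theorem typeOfEq_eq_altOfEq : ∀ ab ac ad bc bd cd : Bool,
    eqConsistent ab ac ad bc bd cd = true → typeOfEq ab ac ad bc bd cd = altOfEq ab ac ad bc bd cd := by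
  decide

lemma A_bridge (a b c d : Char) :
    idiom_type (String.ofList [a, b, c, d]) = typeOfEq (a == b) (a == c) (a == d) (b == c) (b == d) (c == d) := by
  simp [idiom_type, typeOfEq, pysem]

lemma B_bridge (a b c d : Char) :
    idiom_type_alt (String.ofList [a, b, c, d]) = altOfEq (a == b) (a == c) (a == d) (b == c) (b == d) (c == d) := by
  simp [idiom_type_alt, altOfEq, List.idxOf_cons, Bool.cond_eq_ite]
  split_ifs <;> rfl

lemma eqConsistent_chars (a b c d : Char) :
    eqConsistent (a == b) (a == c) (a == d) (b == c) (b == d) (c == d) = true := by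
  by_cases hab : a = b <;> by_cases hac : a = c <;> by_cases had : a = d <;>
    by_cases hbc : b = c <;> by_cases hbd : b = d <;> by_cases hcd : c = d <;>
    simp_all [eqConsistent, triConsistent]

lemma idiom_type_eq_alt (a b c d : Char) :
    idiom_type (String.ofList [a, b, c, d]) = idiom_type_alt (String.ofList [a, b, c, d]) := by
  rw [A_bridge, B_bridge]
  exact typeOfEq_eq_altOfEq _ _ _ _ _ _ (eqConsistent_chars a b c d)

-- A's and B's classifiers agree on 4-character strings (the only strings either port applies them to)
lemma idiom_type_eq_alt_of_len (s : String) (h : PySem.Str.len s = 4) :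
    idiom_type s = idiom_type_alt s := by
  have h4 : s.toList.length = 4 := by
    have h' : (s.length : Int) = 4 := by simpa [PySem.Str.len_eq] using h
    have h'' : s.length = 4 := by exact_mod_cast h'
    simpa using h''
  have hs := String.ofList_toList (s := s)
  rcases hl : s.toList with _ | ⟨a, _ | ⟨b, _ | ⟨c, _ | ⟨d, _ | ⟨e, t⟩⟩⟩⟩⟩ <;>
    rw [hl] at h4 <;> simp at h4
  rw [← hs, hl]
  exact idiom_type_eq_alt a b c d

-- the keys accumulated by A's first pass contain x iff the seed does, for x not an idiom key
lemma keysFold_contains (key x : String) (l : List (String × String)) (ks : List String)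
    (hx : x ∉ l.map Prod.fst) :
    (l.foldl (fun ks kv =>
        if PySem.Str.isIn key kv.1 || PySem.Str.isIn key kv.2 then ks ++ [kv.1] else ks) ks).contains x
      = ks.contains x := by
  rw [PySem.List.foldl_append_if (p := fun kv => PySem.Str.isIn key kv.1 || PySem.Str.isIn key kv.2)
    (f := fun kv : String × String => kv.1)]
  simp
  intro y hy _
  exact (hx (List.mem_map_of_mem (f := Prod.fst) hy)).elim

-- A's and B's insertion conditions agree (the classifiers only matter under the length guard)
lemma cond_eq (type : String) (k : String) (b : Bool) :
    (b && (PySem.Str.len k == 4) && (idiom_type k == type))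
      = (b && (PySem.Str.len k == 4) && (idiom_type_alt k == type)) := by
  by_cases hlen : PySem.Str.len k = 4
  · rw [idiom_type_eq_alt_of_len k hlen]
  · have hb : (PySem.Str.len k == 4) = false := beq_eq_false_iff_ne.mpr hlen
    rw [hb]
    simp

-- the fused pass equals the two sequential passes when idiom keys are distinct
lemma fused_eq (key type : String) :
    ∀ (l : List (String × String)) (ks : List String) (d : PySem.Dict String String),
    (l.map Prod.fst).Nodup →
    l.foldl (fun (d : PySem.Dict String String) kv =>
        if (l.foldl (fun ks kv =>
              if PySem.Str.isIn key kv.1 || PySem.Str.isIn key kv.2 then ks ++ [kv.1] else ks) ks).contains kv.1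
           && (PySem.Str.len kv.1 == 4) && (idiom_type kv.1 == type)
        then d.insert kv.1 kv.2 else d) d
    = (l.foldl (fun (st : List String × PySem.Dict String String) kv =>
        let ks := if PySem.Str.isIn key kv.1 || PySem.Str.isIn key kv.2 then st.1 ++ [kv.1] else st.1
        let ctx := if ks.contains kv.1 && (PySem.Str.len kv.1 == 4) && (idiom_type_alt kv.1 == type)
                   then st.2.insert kv.1 kv.2 else st.2
        (ks, ctx)) (ks, d)).2 := by
  intro l
  induction l with
  | nil => intro ks d _; rfl
  | cons kv rest ih =>
    intro ks d h
    simp only [List.map_cons, List.nodup_cons] at h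
    obtain ⟨hkv, hrest⟩ := h
    simp only [List.foldl_cons]
    have hcont : ((rest.foldl (fun ks kv =>
        if PySem.Str.isIn key kv.1 || PySem.Str.isIn key kv.2 then ks ++ [kv.1] else ks)
        (if PySem.Str.isIn key kv.1 || PySem.Str.isIn key kv.2 then ks ++ [kv.1] else ks)).contains kv.1)
        = (if PySem.Str.isIn key kv.1 || PySem.Str.isIn key kv.2 then ks ++ [kv.1] else ks).contains kv.1 :=
      keysFold_contains key kv.1 rest _ hkv
    rw [← ih (if PySem.Str.isIn key kv.1 || PySem.Str.isIn key kv.2 then ks ++ [kv.1] else ks)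
          (if (if PySem.Str.isIn key kv.1 || PySem.Str.isIn key kv.2 then ks ++ [kv.1] else ks).contains kv.1
              && (PySem.Str.len kv.1 == 4) && (idiom_type_alt kv.1 == type)
           then d.insert kv.1 kv.2 else d) hrest]
    congr 1
    apply if_congr ?_ rfl rfl
    rw [hcont, cond_eq type kv.1]

-- ===== VERDICT (by name: the statement is the Claim_ definition above) =====
theorem search_by_key_type_spec : Claim_equal_search_by_key_type := by
  intro key type idioms context keys _ hpre
  unfold Spec_search_by_key_type search_by_key_type search_by_key_type_alt
  exact congrArg PySem.Dict.items (fused_eq key type idioms keys (PySem.Dict.mk context) hpre)
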